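-- pv_equiv track=rewrite | github.com/ferraroroberto/pdf-to-markdown | src/validation.py | _count_tables
-- ===== SOURCE A (Python) =====
-- def _count_tables(markdown: str) -> int:
--     """Count distinct tables in markdown.
--
--     A table is a contiguous block of lines where every line starts and
--     ends with a pipe character.
--     """
--     lines = markdown.split("\n")
--     in_table = False
--     count = 0
--     for line in lines:
--         stripped = line.strip()
--         is_table_line = stripped.startswith("|") and stripped.endswith("|") and len(stripped) > 1
--         if is_table_line and not in_table:
--             count += 1
--             in_table = True
--         elif not is_table_line:
--             in_table = False
--     return count
-- ===== SOURCE B (Python) =====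
-- def _count_tables(markdown: str) -> int:
--     """Count distinct tables: encode lines as a bitstring, split it on the
--     zero character, count the nonempty runs (each maximal run of ones is one table)."""
--     bits = "".join(
--         "1" if s.startswith("|") and s.endswith("|") and len(s) > 1 else "0"
--         for s in (line.strip() for line in markdown.split("\n"))
--     )
--     return len([run for run in bits.split("0") if run])
-- ===== Notes on version B (the rewrite author's own statement) =====
-- stated objective: alternative
-- what changed: Replaces A's in_table state machine with a string-encoding algorithm: each line becomes a one-or-zero character, the bitstring is split on the zero character, and the nonempty runs are counted.
import Mathlib
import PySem

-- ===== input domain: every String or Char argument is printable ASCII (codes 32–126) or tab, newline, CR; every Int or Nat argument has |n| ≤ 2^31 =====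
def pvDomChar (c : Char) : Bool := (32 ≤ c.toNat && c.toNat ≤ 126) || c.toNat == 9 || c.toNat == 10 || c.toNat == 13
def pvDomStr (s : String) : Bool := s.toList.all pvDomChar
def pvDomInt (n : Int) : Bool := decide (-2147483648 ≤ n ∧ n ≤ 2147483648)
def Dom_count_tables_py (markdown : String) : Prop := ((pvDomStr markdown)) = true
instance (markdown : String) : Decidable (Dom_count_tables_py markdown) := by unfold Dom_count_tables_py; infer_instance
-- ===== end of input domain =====

-- B replaces A's in_table state machine by encoding each line as a one/zero character, splitting the
-- resulting bitstring on the zero character and counting the nonempty runs (alternative decomposition; same O(n) cost).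

-- ===== PORT A =====
-- the per-line predicate ('stripped.startswith("|") and stripped.endswith("|") and len(stripped) > 1')
def pvIsTableLine (line : String) : Bool :=
  let stripped := PySem.Str.strip line
  PySem.Str.startswith stripped "|" && PySem.Str.endswith stripped "|" && decide (1 < PySem.Str.len stripped)

def count_tables_py (markdown : String) : Int :=
  let lines := (PySem.Str.split? markdown "\n").getD []  -- sep "\n" is nonempty, split? is some here
  let res := lines.foldl (fun (st : Bool × Int) line =>
    let is_table_line := pvIsTableLine line
    if is_table_line && !st.1 then (true, st.2 + 1)
    else if !is_table_line then (false, st.2)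
    else st) (false, 0)
  res.2

-- ===== PORT B =====
def count_tables_py_alt (markdown : String) : Int :=
  let bits := PySem.Str.join ""
    (((PySem.Str.split? markdown "\n").getD []).map
      (fun line => if pvIsTableLine line then "1" else "0"))  -- sep "\n" nonempty, split? is some
  let parts := (PySem.Str.split? bits "0").getD []            -- sep "0" nonempty, split? is some
  -- Python's 'if run' truthiness on a str is 'len(run) != 0'
  (((parts.filter (fun run => PySem.Str.len run != 0)).length : Nat) : Int)

-- ===== PRECONDITION & SPEC =====
def Spec_count_tables_py (markdown : String) (out : Int) : Prop := out = count_tables_py_alt markdown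
instance (markdown : String) (out : Int) : Decidable (Spec_count_tables_py markdown out) := by unfold Spec_count_tables_py; infer_instance

-- ===== CLAIM (what is proved, stated in full; the proofs are below) =====
def Claim_equal_count_tables_py : Prop := ∀ (markdown : String), Dom_count_tables_py markdown → Spec_count_tables_py markdown (count_tables_py markdown)

-- ===== LEMMAS AND PROOFS =====

-- A's loop step on the flag of the current line
def pvStep (st : Bool × Int) (b : Bool) : Bool × Int :=
  if b && !st.1 then (true, st.2 + 1)
  else if !b then (false, st.2)
  else st

-- reference splitter: what PySem.Chars.splitOn computes for the one-char separator '0'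
def pvSplit0 : List Char → List (List Char)
  | [] => [[]]
  | c :: rest => if c = '0' then [] :: pvSplit0 rest
                 else (c :: (pvSplit0 rest).headI) :: (pvSplit0 rest).tail

theorem pvSplit0_ne_nil (cs : List Char) : pvSplit0 cs ≠ [] := by
  cases cs with
  | nil => simp [pvSplit0]
  | cons c rest => by_cases h : c = '0' <;> simp [pvSplit0, h]

theorem pvSplit0_cons_headI_tail (cs : List Char) :
    pvSplit0 cs = (pvSplit0 cs).headI :: (pvSplit0 cs).tail := by
  cases h : pvSplit0 cs with
  | nil => exact absurd h (pvSplit0_ne_nil cs)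
  | cons a t => simp

theorem pvSplitOn_go_eq : ∀ (fuel : Nat) (cs cur : List Char) (acc : List (List Char)),
    cs.length < fuel →
    PySem.Chars.splitOn.go ['0'] fuel cs cur acc
      = acc.reverse ++ (pvSplit0 cs).modifyHead (fun h => cur.reverse ++ h) := by
  intro fuel
  induction fuel with
  | zero => intro cs cur acc h; omega
  | succ f ih =>
    intro cs cur acc h
    cases cs with
    | nil =>
      simp [PySem.Chars.splitOn.go, pvSplit0]
    | cons c rest =>
      by_cases hc : c = '0'
      · subst hc
        have hpre : List.isPrefixOf ['0'] ('0' :: rest) = true := by simp [List.isPrefixOf]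
        rw [PySem.Chars.splitOn.go]
        simp only [hpre, if_true, List.length_cons, List.length_nil, List.drop_succ_cons, List.drop_zero]
        rw [ih rest [] ((cur.reverse) :: acc) (by simpa using Nat.lt_of_succ_lt_succ h)]
        conv_rhs => rw [show pvSplit0 ('0' :: rest) = [] :: pvSplit0 rest from by rw [pvSplit0, if_pos rfl]]
        rw [pvSplit0_cons_headI_tail rest]
        simp
      · have hpre : List.isPrefixOf ['0'] (c :: rest) = false := by
          simp only [List.isPrefixOf, Bool.and_true,
            beq_eq_false_iff_ne, ne_eq]
          exact fun h' => hc h'.symm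
        rw [PySem.Chars.splitOn.go]
        simp only [hpre]
        rw [ih rest (c :: cur) acc (by simpa using Nat.lt_of_succ_lt_succ h)]
        conv_rhs => rw [show pvSplit0 (c :: rest)
            = (c :: (pvSplit0 rest).headI) :: (pvSplit0 rest).tail from by
          rw [pvSplit0, if_neg hc]]
        rw [pvSplit0_cons_headI_tail rest]
        simp [List.append_assoc]

theorem pvSplitOn_eq (cs : List Char) :
    PySem.Chars.splitOn cs ['0'] = pvSplit0 cs := by
  rw [PySem.Chars.splitOn, pvSplitOn_go_eq (cs.length + 1) cs [] [] (by omega)]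
  rw [pvSplit0_cons_headI_tail cs]
  simp

-- bit encoding of the flag list
def pvEnc (fs : List Bool) : List Char := fs.map (fun b => if b then '1' else '0')

theorem pvEnc_true (fs : List Bool) : pvEnc (true :: fs) = '1' :: pvEnc fs := rfl
theorem pvEnc_false (fs : List Bool) : pvEnc (false :: fs) = '0' :: pvEnc fs := rfl

-- the run count B extracts from the split
def pvN (fs : List Bool) : Nat := (pvSplit0 (pvEnc fs)).countP (fun l => !l.isEmpty)

theorem pvHeadI_enc (fs : List Bool) :
    ((pvSplit0 (pvEnc fs)).headI.isEmpty) = !(fs.head?.getD false) := by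
  cases fs with
  | nil => simp [pvEnc, pvSplit0]
  | cons b t =>
    cases b
    · simp [pvEnc_false, pvSplit0]
    · rw [pvEnc_true, show pvSplit0 ('1' :: pvEnc t)
          = ('1' :: (pvSplit0 (pvEnc t)).headI) :: (pvSplit0 (pvEnc t)).tail from by
        rw [pvSplit0, if_neg (by decide : ¬ ('1' : Char) = '0')]]
      simp

theorem pvN_nil : pvN [] = 0 := by simp [pvN, pvEnc, pvSplit0]

theorem pvN_false (fs : List Bool) : pvN (false :: fs) = pvN fs := by
  unfold pvN
  rw [pvEnc_false, show pvSplit0 ('0' :: pvEnc fs) = [] :: pvSplit0 (pvEnc fs) from by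
    rw [pvSplit0, if_pos rfl]]
  simp

theorem pvN_true (fs : List Bool) :
    pvN (true :: fs) = pvN fs + (if fs.head?.getD false then 0 else 1) := by
  have h := pvSplit0_cons_headI_tail (pvEnc fs)
  have hh := pvHeadI_enc fs
  simp only [pvN, pvEnc_true]
  rw [show pvSplit0 ('1' :: pvEnc fs)
        = ('1' :: (pvSplit0 (pvEnc fs)).headI) :: (pvSplit0 (pvEnc fs)).tail from by
      rw [pvSplit0, if_neg (by decide : ¬ ('1' : Char) = '0')]]
  rw [List.countP_cons]
  conv_rhs => rw [h, List.countP_cons]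
  cases hb : fs.head?.getD false <;> rw [hb] at hh <;> simp [hh]

-- main invariant: A's fold equals the run count, corrected for an already-open table
theorem pvFold_eq (fs : List Bool) : ∀ (prev : Bool) (c : Int),
    (fs.foldl pvStep (prev, c)).2
      + (if prev && fs.head?.getD false then (1 : Int) else 0)
      = c + (pvN fs : Int) := by
  induction fs with
  | nil => intro prev c; simp [pvN_nil]
  | cons b t ih =>
    intro prev c
    have hstep : pvStep (prev, c) b = (b, if b && !prev then c + 1 else c) := by
      cases b <;> cases prev <;> simp [pvStep]
    rw [List.foldl_cons, hstep]
    have := ih b (if b && !prev then c + 1 else c)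
    cases b with
    | false => simpa [pvN_false] using this
    | true =>
      rw [pvN_true]
      cases hh : t.head?.getD false <;> rw [hh] at this <;>
        cases prev <;> simp at this ⊢ <;> omega

-- filter-by-length over mapped strings counts the nonempty char lists
theorem pvFilter_len (L : List (List Char)) :
    ((L.map String.ofList).filter (fun run => PySem.Str.len run != 0)).length
      = L.countP (fun l => !l.isEmpty) := by
  induction L with
  | nil => rfl
  | cons l t ih =>
    simp only [List.map_cons, List.filter_cons, List.countP_cons]
    by_cases h : l = []
    · subst h; simp; simpa using ih
    · simp [h]; simpa using ih

theorem count_tables_py_spec : Claim_equal_count_tables_py := by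
  intro markdown _
  unfold Spec_count_tables_py count_tables_py count_tables_py_alt
  dsimp only
  generalize ((PySem.Str.split? markdown "\n").getD []) = lines
  -- B side: identify the split of the joined bitstring
  have hbits : (PySem.Str.join "" (lines.map (fun line => if pvIsTableLine line then "1" else "0"))).toList
      = pvEnc (lines.map pvIsTableLine) := by
    rw [PySem.Str.toList_join]
    have : (lines.map (fun line => if pvIsTableLine line then "1" else "0")).map String.toList
        = (pvEnc (lines.map pvIsTableLine)).map (fun c => [c]) := by
      simp only [List.map_map, pvEnc]
      apply List.map_congr_left
      intro line _
      by_cases h : pvIsTableLine line <;> simp [h]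
    rw [this]
    simp
  have hsplit : PySem.Str.split?
      (PySem.Str.join "" (lines.map (fun line => if pvIsTableLine line then "1" else "0"))) "0"
      = some ((pvSplit0 (pvEnc (lines.map pvIsTableLine))).map String.ofList) := by
    rw [PySem.Str.split?]
    have : PySem.Chars.split?
        (PySem.Str.join "" (lines.map (fun line => if pvIsTableLine line then "1" else "0"))).toList
        ("0" : String).toList = some (pvSplit0 (pvEnc (lines.map pvIsTableLine))) := by
      rw [hbits]
      simp [PySem.Chars.split?, pvSplitOn_eq]
    rw [this]
    rfl
  rw [hsplit]
  simp only [Option.getD_some]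
  rw [pvFilter_len]
  -- A side: fold over the flags
  have eA : (fun (st : Bool × Int) line =>
      let is_table_line := pvIsTableLine line
      if is_table_line && !st.1 then (true, st.2 + 1)
      else if !is_table_line then (false, st.2)
      else st) = fun (st : Bool × Int) line => pvStep st (pvIsTableLine line) := rfl
  rw [eA, ← List.foldl_map (f := pvIsTableLine) (g := pvStep) (l := lines) (init := ((false : Bool), (0 : Int)))]
  have := pvFold_eq (lines.map pvIsTableLine) false 0
  simpa [pvN] using this
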